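-- pv_equiv track=rewrite | github.com/Rishpan/CS683-PokerAgentProject | lucas_agents/learnable_agent_v0/abstraction.py | _board_texture_bucket
-- ===== SOURCE A (Python) =====
-- from collections import Counter
--
-- RANK_VALUE = {r: i for i, r in enumerate("..23456789TJQKA")}
--
-- def _board_texture_bucket(community_card):
--   if not community_card:
--     return 0
--   ranks = [RANK_VALUE[c[1]] for c in community_card]
--   suits = [c[0] for c in community_card]
--   return (
--       int(len(set(ranks)) < len(ranks))
--       + 2 * int(max(Counter(suits).values()) >= 2)
--       + 4 * int(sum(rank >= 10 for rank in ranks) >= 2)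
--       + 8 * int(max(ranks) - min(ranks) <= 4)
--   )
-- ===== SOURCE B (Python) =====
-- RANK_VALUE = {r: i for i, r in enumerate("..23456789TJQKA")}
--
-- def _board_texture_bucket(community_card):
--     if not community_card:
--         return 0
--     # Sort-then-scan: every predicate is read off the two sorted arrays.
--     ranks = sorted(RANK_VALUE[c[1]] for c in community_card)
--     suits = sorted(c[0] for c in community_card)
--     dup = any(a == b for a, b in zip(ranks, ranks[1:]))
--     suited = any(a == b for a, b in zip(suits, suits[1:]))
--     high2 = len(ranks) >= 2 and ranks[-2] >= 10
--     close = ranks[-1] - ranks[0] <= 4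
--     return (1 if dup else 0) + (2 if suited else 0) + (4 if high2 else 0) + (8 if close else 0)
-- ===== Notes on version B (the rewrite author's own statement) =====
-- stated objective: alternative
-- what changed: A runs five unordered whole-list reductions (set-size, Counter+max, sum of a comparison, max, min); B instead SORTS the rank and suit lists once and reads every predicate off the sorted arrays: duplicates become adjacent-equal pairs, >=2 high cards becomes 'second-largest element >= 10', and the rank span is last-minus-first.
import Mathlib
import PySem

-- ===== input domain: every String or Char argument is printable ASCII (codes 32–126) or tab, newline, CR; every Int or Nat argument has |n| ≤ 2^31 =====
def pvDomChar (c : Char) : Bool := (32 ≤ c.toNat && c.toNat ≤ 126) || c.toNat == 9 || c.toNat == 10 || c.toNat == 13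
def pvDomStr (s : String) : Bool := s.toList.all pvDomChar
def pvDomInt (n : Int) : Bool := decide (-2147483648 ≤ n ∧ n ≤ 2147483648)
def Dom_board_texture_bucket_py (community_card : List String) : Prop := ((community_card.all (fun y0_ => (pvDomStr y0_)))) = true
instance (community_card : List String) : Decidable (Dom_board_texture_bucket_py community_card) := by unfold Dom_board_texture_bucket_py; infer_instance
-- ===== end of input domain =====

-- B replaces A's unordered whole-list reductions (set-size, Counter+max, sum, max, min) by a
-- sort-then-scan: sort ranks and suits once, then read the four bits off the sorted arrays
-- (objective: alternative; same return value).

-- ===== PORT A =====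
-- RANK_VALUE = {r: i for i, r in enumerate("..23456789TJQKA")}
def pvRankValue : PySem.Dict Char Int :=
  (PySem.List.enumerate "..23456789TJQKA".toList).foldl
    (fun d p => d.insert p.2 p.1) PySem.Dict.empty

-- RANK_VALUE[c[1]]  (total form; Pre_ excludes the IndexError/KeyError inputs)
def pvRk (c : String) : Int := (pvRankValue.get? ((PySem.Str.pyGet? c 1).getD ' ')).getD 0
-- c[0]
def pvSt (c : String) : Char := (PySem.Str.pyGet? c 0).getD ' '

def board_texture_bucket_py (community_card : List String) : Int :=
  if community_card = [] then 0 else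
  let ranks := community_card.map pvRk
  let suits := community_card.map pvSt
  (if (PySem.Set.ofList ranks).length < ranks.length then (1:Int) else 0)
  + 2 * (if 2 ≤ (PySem.List.max? (PySem.Dict.counter suits).values (fun v => v)).getD 0 then 1 else 0)
  + 4 * (if 2 ≤ (ranks.map (fun r => if 10 ≤ r then (1:Int) else 0)).sum then 1 else 0)
  + 8 * (if (PySem.List.max? ranks (fun r => r)).getD 0
           - (PySem.List.min? ranks (fun r => r)).getD 0 ≤ 4 then 1 else 0)

-- ===== PORT B =====
-- any(a == b for a, b in zip(l, l[1:]))
def pvAdjDup {α : Type} [BEq α] (l : List α) : Bool :=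
  (l.zip (PySem.List.slice l (some 1) none)).any (fun p => p.1 == p.2)

def board_texture_bucket_py_alt (community_card : List String) : Int :=
  if community_card = [] then 0 else
  let ranks := PySem.List.sorted (community_card.map pvRk) (fun x => x) false
  let suits := PySem.List.sorted (community_card.map pvSt) (fun c => c) false
  let dup := pvAdjDup ranks
  let suited := pvAdjDup suits
  let high2 := decide (2 ≤ ranks.length) && decide (10 ≤ (PySem.List.pyGet? ranks (-2)).getD 0)
  let close := decide ((PySem.List.pyGet? ranks (-1)).getD 0 - (PySem.List.pyGet? ranks 0).getD 0 ≤ 4)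
  (if dup then (1:Int) else 0) + (if suited then 2 else 0)
  + (if high2 then 4 else 0) + (if close then 8 else 0)

-- ===== PRECONDITION & SPEC =====
-- Pre_ excludes exactly the inputs where the Python A raises: a card shorter than two
-- characters (IndexError on c[1]) or whose second character is not a RANK_VALUE key (KeyError).
def Pre_board_texture_bucket_py (community_card : List String) : Prop :=
  ∀ c ∈ community_card, 2 ≤ c.toList.length ∧ c.toList.getD 1 ' ' ∈ "..23456789TJQKA".toList
instance (community_card : List String) : Decidable (Pre_board_texture_bucket_py community_card) := by
  unfold Pre_board_texture_bucket_py; infer_instance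

def pvWitness_board_texture_bucket_py : List String := ["hK", "dK", "s3"]

def Spec_board_texture_bucket_py (community_card : List String) (out : Int) : Prop := out = board_texture_bucket_py_alt community_card
instance (community_card : List String) (out : Int) : Decidable (Spec_board_texture_bucket_py community_card out) := by unfold Spec_board_texture_bucket_py; infer_instance

-- ===== CLAIM (what is proved, stated in full; the proofs are below) =====
def Claim_equal_board_texture_bucket_py : Prop := ∀ (community_card : List String), Dom_board_texture_bucket_py community_card → Pre_board_texture_bucket_py community_card → Spec_board_texture_bucket_py community_card (board_texture_bucket_py community_card)

-- ===== LEMMAS AND PROOFS =====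

-- zip-with-tail unfolding of pvAdjDup
lemma pvAdjDup_cons_cons {α : Type} [BEq α] (a b : α) (t : List α) :
    pvAdjDup (a :: b :: t) = ((a == b) || pvAdjDup (b :: t)) := by
  simp [pvAdjDup, PySem.List.slice_from]

-- in a ≤-sorted list, a duplicate exists iff an ADJACENT duplicate exists
lemma pvAdjDup_iff {α : Type} [BEq α] [LawfulBEq α] [LinearOrder α]
    (l : List α) (h : l.Pairwise (· ≤ ·)) : pvAdjDup l = true ↔ ¬ l.Nodup := by
  induction l with
  | nil => simp [pvAdjDup, PySem.List.slice_from]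
  | cons a t ih =>
    cases t with
    | nil => simp [pvAdjDup, PySem.List.slice_from]
    | cons b u =>
      rw [pvAdjDup_cons_cons]
      have hpt : (b :: u).Pairwise (· ≤ ·) := h.tail
      by_cases hab : a = b
      · subst hab
        simp [List.nodup_cons]
      · have hlt : ∀ x ∈ b :: u, a < x := by
          intro x hx
          have hle : a ≤ x := (List.pairwise_cons.mp h).1 x hx
          rcases List.mem_cons.mp hx with rfl | hx
          · exact lt_of_le_of_ne hle hab
          · have : b ≤ x := (List.pairwise_cons.mp hpt).1 x hx
            have hab' : a ≤ b := (List.pairwise_cons.mp h).1 b (by simp)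
            exact lt_of_lt_of_le (lt_of_le_of_ne hab' hab) this
        have hna : a ∉ b :: u := fun hm => absurd (hlt a hm) (lt_irrefl a)
        rw [beq_eq_false_iff_ne.mpr hab, Bool.false_or, ih hpt]
        simp [List.nodup_cons, hna]

-- same length-of-set duplicate test as A uses, from the previous characterisation
lemma pvLength_ofList_lt_iff {α : Type} [BEq α] [LawfulBEq α] (xs : List α) :
    (PySem.Set.ofList xs).length < xs.length ↔ ¬ xs.Nodup := by
  induction xs using List.reverseRecOn with
  | nil => simp [PySem.Set.ofList]
  | append_singleton l x ih =>
    rw [PySem.Set.ofList_append_singleton]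
    by_cases hx : x ∈ l
    · have h1 := PySem.Set.length_ofList_le l
      simp [PySem.Set.add, PySem.Set.contains, hx, List.nodup_append]
      omega
    · simp [PySem.Set.add, PySem.Set.contains, hx, List.nodup_append, ih]

lemma pvCounterMax_iff (xs : List Char) (h : xs ≠ []) :
    (2 ≤ (PySem.List.max? (PySem.Dict.counter xs).values (fun v => v)).getD 0) ↔ ¬ xs.Nodup := by
  have hvals : (PySem.Dict.counter xs).values
      = (PySem.Set.ofList xs).map (fun k => ((xs.count k : Int))) := by
    simp only [PySem.Dict.values, PySem.Dict.items_counter, List.map_map]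
    rfl
  have hne : (PySem.Dict.counter xs).values ≠ [] := by
    rw [hvals]
    obtain ⟨x, xs', rfl⟩ := List.exists_cons_of_ne_nil h
    have : x ∈ PySem.Set.ofList (x :: xs') := (PySem.Set.mem_ofList _ _).mpr (by simp)
    exact fun he => by simp [List.map_eq_nil_iff] at he; simp [he] at this
  obtain ⟨m, hm⟩ : ∃ m, PySem.List.max? (PySem.Dict.counter xs).values (fun v => v) = some m := by
    cases hmm : PySem.List.max? (PySem.Dict.counter xs).values (fun v => v) with
    | none => exact absurd ((PySem.List.max?_eq_none_iff _ _).mp hmm) hne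
    | some m => exact ⟨m, rfl⟩
  rw [hm, Option.getD_some]
  constructor
  · intro h2 hnd
    have hmem := PySem.List.max?_mem hm
    rw [hvals] at hmem
    obtain ⟨k, hk, hkm⟩ := List.mem_map.mp hmem
    have hc1 := List.nodup_iff_count_le_one.mp hnd k
    have : (xs.count k : Int) ≤ 1 := by exact_mod_cast hc1
    omega
  · intro hnd
    obtain ⟨k, hk⟩ : ∃ k, 2 ≤ xs.count k := by
      by_contra hall
      push_neg at hall
      exact hnd (List.nodup_iff_count_le_one.mpr (fun a => by have := hall a; omega))
    have hkx : k ∈ xs := List.count_pos_iff.mp (by omega)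
    have hmem : ((xs.count k : Int)) ∈ (PySem.Dict.counter xs).values := by
      rw [hvals]
      exact List.mem_map_of_mem ((PySem.Set.mem_ofList _ _).mpr hkx)
    have hle := PySem.List.max?_isMax hm _ hmem
    have : (2 : Int) ≤ (xs.count k : Int) := by exact_mod_cast hk
    omega

-- in a ≤-sorted Int list, '≥ 2 high cards' is exactly 'second-from-the-end ≥ 10'
lemma pvHigh_iff (l : List Int) (h : l.Pairwise (· ≤ ·)) :
    (2 ≤ (l.countP (fun r => decide (10 ≤ r)) : Int)) ↔
    (2 ≤ l.length ∧ 10 ≤ l.getD (l.length - 2) 0) := by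
  induction l with
  | nil => simp
  | cons a t ih =>
    cases t with
    | nil =>
      simp only [List.countP_cons, List.countP_nil]
      constructor
      · intro h2; split at h2 <;> simp_all <;> omega
      · intro ⟨h2, _⟩; simp at h2
    | cons b u =>
      have hpt : (b :: u).Pairwise (· ≤ ·) := h.tail
      have hab : a ≤ b := (List.pairwise_cons.mp h).1 b (by simp)
      by_cases ha : 10 ≤ a
      · -- every element is ≥ 10
        have hall : ∀ x ∈ a :: b :: u, (fun r => decide (10 ≤ r)) x = true := by
          intro x hx
          rcases List.mem_cons.mp hx with rfl | hx
          · simpa using ha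
          · have : a ≤ x := (List.pairwise_cons.mp h).1 x hx
            simp only [decide_eq_true_eq]; omega
        rw [List.countP_eq_length.mpr hall]
        have hidx : (a :: b :: u).length - 2 < (a :: b :: u).length := by simp
        have hmem : (a :: b :: u).getD ((a :: b :: u).length - 2) 0 ∈ (a :: b :: u) := by
          rw [List.getD_eq_getElem _ _ hidx]
          exact List.getElem_mem _
        have := hall _ hmem
        simp only [decide_eq_true_eq] at this
        constructor
        · intro _; exact ⟨by simp, this⟩
        · intro _; simp; omega
      · have hcnt : (a :: b :: u).countP (fun r => decide (10 ≤ r))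
            = (b :: u).countP (fun r => decide (10 ≤ r)) := by
          simp [List.countP_cons, ha]
        rw [hcnt]
        cases u with
        | nil =>
          simp only [List.length_cons, List.length_nil, List.countP_cons, List.countP_nil]
          constructor
          · intro h2; split at h2 <;> simp_all
          · intro ⟨_, h10⟩
            simp only [List.getD] at h10
            simp at h10
            omega
        | cons v w =>
          rw [ih hpt]
          have hg : (a :: b :: v :: w).getD ((a :: b :: v :: w).length - 2) 0
              = (b :: v :: w).getD ((b :: v :: w).length - 2) 0 := by
            simp only [List.length_cons]
            have : w.length + 3 - 2 = (w.length + 2 - 2) + 1 := by omega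
            rw [this]
            rfl
          rw [hg]
          simp only [List.length_cons]
          constructor
          · intro ⟨_, h10⟩; exact ⟨by omega, h10⟩
          · intro ⟨_, h10⟩; exact ⟨by omega, h10⟩

-- A's indicator sum equals the countP
lemma pvSum_eq_countP (l : List Int) :
    (l.map (fun r => if 10 ≤ r then (1:Int) else 0)).sum = (l.countP (fun r => decide (10 ≤ r)) : Int) := by
  induction l with
  | nil => simp
  | cons a t ih => by_cases h : 10 ≤ a <;> simp [List.countP_cons, h, ih] <;> omega

theorem pv_main (cc : List String) :
    board_texture_bucket_py cc = board_texture_bucket_py_alt cc := by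
  cases hcc : cc with
  | nil => rfl
  | cons c cs =>
    unfold board_texture_bucket_py board_texture_bucket_py_alt
    rw [if_neg (by simp), if_neg (by simp)]
    set ranks := (c :: cs).map pvRk with hranks
    set suits := (c :: cs).map pvSt with hsuits
    have hrne : ranks ≠ [] := by simp [hranks]
    have hsne : suits ≠ [] := by simp [hsuits]
    set R := PySem.List.sorted ranks (fun x => x) false with hR
    set S := PySem.List.sorted suits (fun c => c) false with hS
    have hRperm : R.Perm ranks := PySem.List.sorted_perm ..
    have hSperm : S.Perm suits := PySem.List.sorted_perm ..
    have hRpair : R.Pairwise (· ≤ ·) := by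
      have := PySem.List.sorted_pairwise (xs := ranks) (key := fun x => x)
      simpa using this
    have hSpair : S.Pairwise (· ≤ ·) := by
      have := PySem.List.sorted_pairwise (xs := suits) (key := fun c => c)
      simpa using this
    have hRne : R ≠ [] := by simp [hR, PySem.List.sorted_eq_nil_iff, hranks]
    have hSne : S ≠ [] := by simp [hS, PySem.List.sorted_eq_nil_iff, hsuits]
    -- bit 1: duplicate rank
    have e1 : (if (PySem.Set.ofList ranks).length < ranks.length then (1:Int) else 0)
        = (if pvAdjDup R then (1:Int) else 0) := by
      have : pvAdjDup R = true ↔ (PySem.Set.ofList ranks).length < ranks.length := by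
        rw [pvAdjDup_iff R hRpair, hRperm.nodup_iff, pvLength_ofList_lt_iff]
      by_cases hd : pvAdjDup R = true
      · rw [if_pos (this.mp hd), if_pos hd]
      · rw [if_neg (fun hl => hd (this.mpr hl)), if_neg hd]
    -- bit 2: repeated suit
    have e2 : 2 * (if 2 ≤ (PySem.List.max? (PySem.Dict.counter suits).values (fun v => v)).getD 0 then (1:Int) else 0)
        = (if pvAdjDup S then (2:Int) else 0) := by
      have : pvAdjDup S = true ↔
          2 ≤ (PySem.List.max? (PySem.Dict.counter suits).values (fun v => v)).getD 0 := by
        rw [pvAdjDup_iff S hSpair, hSperm.nodup_iff, pvCounterMax_iff suits hsne]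
      by_cases hd : pvAdjDup S = true
      · rw [if_pos (this.mp hd), if_pos hd]; norm_num
      · rw [if_neg (fun hl => hd (this.mpr hl)), if_neg hd]; norm_num
    -- bit 3: ≥ 2 high cards
    have e3 : 4 * (if 2 ≤ (ranks.map (fun r => if 10 ≤ r then (1:Int) else 0)).sum then (1:Int) else 0)
        = (if (decide (2 ≤ R.length) && decide (10 ≤ (PySem.List.pyGet? R (-2)).getD 0)) then (4:Int) else 0) := by
      have hcp : ranks.countP (fun r => decide (10 ≤ r)) = R.countP (fun r => decide (10 ≤ r)) :=
        (hRperm.countP_eq _).symm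
      have hlen : ranks.length = R.length := hRperm.length_eq.symm
      rw [pvSum_eq_countP, hcp]
      by_cases h2 : 2 ≤ R.length
      · have hget : PySem.List.pyGet? R (-2) = R[R.length - 2]? :=
          PySem.List.pyGet?_neg_ofNat R 2 (by omega) (by omega)
        have hgd : (PySem.List.pyGet? R (-2)).getD 0 = R.getD (R.length - 2) 0 := by
          rw [hget, List.getD_eq_getElem?_getD]
        have hcond : ((decide (2 ≤ R.length) && decide (10 ≤ (PySem.List.pyGet? R (-2)).getD 0)) = true)
            ↔ (2 ≤ R.length ∧ 10 ≤ R.getD (R.length - 2) 0) := by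
          simp [hgd]
        by_cases hh : 2 ≤ (R.countP (fun r => decide (10 ≤ r)) : Int)
        · rw [if_pos hh, if_pos (hcond.mpr ⟨h2, ((pvHigh_iff R hRpair).mp hh).2⟩)]; norm_num
        · rw [if_neg hh, if_neg (fun hb => hh ((pvHigh_iff R hRpair).mpr (hcond.mp hb)))]; norm_num
      · -- R.length ≤ 1: countP ≤ 1 and the alt guard is false
        have hc1 : R.countP (fun r => decide (10 ≤ r)) ≤ R.length := List.countP_le_length
        rw [if_neg (by push_cast; omega), if_neg (by simp; omega)]; norm_num
    -- bit 4: rank span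
    have e4 : 8 * (if (PySem.List.max? ranks (fun r => r)).getD 0
          - (PySem.List.min? ranks (fun r => r)).getD 0 ≤ 4 then (1:Int) else 0)
        = (if (PySem.List.pyGet? R (-1)).getD 0 - (PySem.List.pyGet? R 0).getD 0 ≤ 4 then (8:Int) else 0) := by
      obtain ⟨r0, rt, hRc⟩ := List.exists_cons_of_ne_nil hRne
      have hlast : PySem.List.pyGet? R (-1) = R.getLast? := PySem.List.pyGet?_neg_one R
      have hhead : (PySem.List.pyGet? R 0).getD 0 = r0 := by
        rw [hRc, PySem.List.pyGet?_zero_cons, Option.getD_some]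
      -- min? ranks = head of R
      obtain ⟨m, hm⟩ : ∃ m, PySem.List.min? ranks (fun r => r) = some m := by
        cases hmm : PySem.List.min? ranks (fun r => r) with
        | none => exact absurd ((PySem.List.min?_eq_none_iff _ _).mp hmm) hrne
        | some m => exact ⟨m, rfl⟩
      have hmmem : m ∈ ranks := PySem.List.min?_mem hm
      have hmin : ∀ y ∈ ranks, m ≤ y := fun y hy => PySem.List.min?_isMin hm y hy
      have hr0mem : r0 ∈ ranks := hRperm.mem_iff.mp (by rw [hRc]; simp)
      have hr0le : ∀ y ∈ ranks, r0 ≤ y := by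
        intro y hy
        have := PySem.List.key_head_sorted_le (xs := ranks) (key := fun x => x)
          (hR.symm.trans hRc) y hy
        simpa using this
      have hmeq : m = r0 := le_antisymm (hmin r0 hr0mem) (hr0le m hmmem)
      -- max? ranks = last of R
      obtain ⟨M, hM⟩ : ∃ M, PySem.List.max? ranks (fun r => r) = some M := by
        cases hmm : PySem.List.max? ranks (fun r => r) with
        | none => exact absurd ((PySem.List.max?_eq_none_iff _ _).mp hmm) hrne
        | some M => exact ⟨M, rfl⟩
      have hMmem : M ∈ ranks := PySem.List.max?_mem hM
      have hMmax : ∀ y ∈ ranks, y ≤ M := fun y hy => PySem.List.max?_isMax hM y hy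
      have hlmem : R.getLast hRne ∈ ranks := hRperm.mem_iff.mp (List.getLast_mem hRne)
      have hlge : ∀ y ∈ R, y ≤ R.getLast hRne := by
        intro y hy
        obtain ⟨i, hi, rfl⟩ := List.mem_iff_getElem.mp hy
        have hL : R.getLast hRne = R[R.length - 1] := List.getLast_eq_getElem hRne
        rw [hL]
        exact PySem.List.sorted_id_getElem_mono (xs := ranks) (p := i) (q := R.length - 1)
          (by omega) (by simp [← hR]; omega)
      have hMeq : M = R.getLast hRne :=
        le_antisymm (hlge M (hRperm.mem_iff.mpr hMmem)) (hMmax _ hlmem)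
      rw [hm, hM, Option.getD_some, Option.getD_some, hlast,
        List.getLast?_eq_getLast hRne, Option.getD_some, hhead, hmeq, hMeq]
      split_ifs <;> norm_num
    simp only at e1 e2 e3 e4 ⊢
    rw [e1, e2, e3, e4]
    simp only [decide_eq_true_eq]

-- ===== VERDICT (by name: the statement is the Claim_ definition above) =====
theorem board_texture_bucket_py_spec : Claim_equal_board_texture_bucket_py := by
  intro cc _ _
  unfold Spec_board_texture_bucket_py
  exact pv_main cc
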